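-- pv_equiv track=rewrite | github.com/am17an/ProjectEuler | 549.py | compute_M
-- ===== SOURCE A (Python) =====
-- def compute_M(p, a):
--     """Find minimal M where p's exponent in M! >= a"""
--     low = p
--     high = p * a  # Initial upper bound
--     while low < high:
--         mid = (low + high) // 2
--         total = 0
--         power = p
--         while power <= mid:
--             total += mid // power
--             power *= p
--         if total >= a:
--             high = mid
--         else:
--             low = mid + 1
--     return low
-- ===== SOURCE B (Python) =====
-- def compute_M(p, a):
--     """Find minimal M where p's exponent in M! >= a (greedy by powers of p)."""
--     M = 0
--     need = a
--     while need > 0: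
--         power, s = p, 1          # s = exponent that one block power = p^i contributes to M!
--         while s * p + 1 <= need:
--             power, s = power * p, s * p + 1
--         c = need // s            # how many blocks of this size fit
--         M += c * power
--         need -= c * s
--     return max(M, p)
-- ===== Notes on version B (the rewrite author's own statement) =====
-- stated objective: alternative
-- what changed: Replaces the binary search (which recomputes the Legendre exponent sum at every probe) by a direct greedy construction of M from blocks p^i, using that one block p^i contributes (p^i-1)/(p-1) to the exponent of p in M!; no exponent sum is ever evaluated.
-- outside the precondition, e.g. on compute_M(0, 5): A returns 0, B does not finish within the time limit; on compute_M(-2, -3): A returns -2, B returns 0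
import Mathlib
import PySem

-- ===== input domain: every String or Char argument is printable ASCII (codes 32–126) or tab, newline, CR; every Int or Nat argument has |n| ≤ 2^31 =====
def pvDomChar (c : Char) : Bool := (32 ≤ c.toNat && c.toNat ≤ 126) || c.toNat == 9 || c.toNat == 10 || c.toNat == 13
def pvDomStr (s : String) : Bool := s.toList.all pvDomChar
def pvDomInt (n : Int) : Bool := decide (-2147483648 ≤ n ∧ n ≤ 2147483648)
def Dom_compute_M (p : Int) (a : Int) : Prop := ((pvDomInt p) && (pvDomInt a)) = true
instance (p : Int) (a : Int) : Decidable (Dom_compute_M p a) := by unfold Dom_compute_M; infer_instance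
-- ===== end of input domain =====

-- B replaces A's binary search by a direct greedy construction of M from blocks p^i
-- (each block contributes (p^i-1)/(p-1) to the exponent of p in M!); equal on Pre_ (2 ≤ p).


-- ===== PORT A =====
-- A's inner while loop: total += mid // power; power *= p.  Fueled; fuel mid.toNat + 1 is
-- enough whenever 2 ≤ p (lemma pvLegAux_eq below), so the port is exact on Pre_.
def pvLegAux (p mid : Int) : Nat → Int → Int → Int
  | 0, total, _ => total
  | Nat.succ f, total, power =>
    if power ≤ mid then pvLegAux p mid f (total + Int.fdiv mid power) (power * p)
    else total

-- A's outer binary-search loop (mid = (low + high) // 2 inlined).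
def pvLoopA (p a low high : Int) : Int :=
  if h : low < high then
    if a ≤ pvLegAux p (Int.fdiv (low + high) 2) ((Int.fdiv (low + high) 2).toNat + 1) 0 p then
      pvLoopA p a low (Int.fdiv (low + high) 2)
    else
      pvLoopA p a (Int.fdiv (low + high) 2 + 1) high
  else low
termination_by (high - low).toNat
decreasing_by
  · have h2 : Int.fdiv (low + high) 2 = (low + high) / 2 :=
      Int.fdiv_eq_ediv_of_nonneg _ (by norm_num)
    rw [h2] at *; omega
  · have h2 : Int.fdiv (low + high) 2 = (low + high) / 2 :=
      Int.fdiv_eq_ediv_of_nonneg _ (by norm_num)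
    rw [h2] at *; omega

def compute_M (p : Int) (a : Int) : Int := pvLoopA p a p (p * a)

-- ===== PORT B =====
-- B's inner while loop: power, s = power*p, s*p+1 while s*p+1 <= need.  Fueled; fuel
-- need.toNat is enough whenever 2 ≤ p (lemma pvChoose_eq below), so the port is exact on Pre_.
def pvChoose (p need : Int) : Nat → Int → Int → Int × Int
  | 0, power, s => (power, s)
  | Nat.succ f, power, s =>
    if s * p + 1 ≤ need then pvChoose p need f (power * p) (s * p + 1) else (power, s)

-- B's outer while loop: pick the largest block, take as many copies as fit.
def pvGreedy (p : Int) : Nat → Int → Int → Int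
  | 0, M, _ => M
  | Nat.succ f, M, need =>
    if 0 < need then
      let ps := pvChoose p need need.toNat p 1
      let c := Int.fdiv need ps.2
      pvGreedy p f (M + c * ps.1) (need - c * ps.2)
    else M

def compute_M_alt (p : Int) (a : Int) : Int := max (pvGreedy p a.toNat 0 a) p

-- ===== PRECONDITION & SPEC =====
-- Pre_ covers the natural domain 2 ≤ p (p a prime in A's use) plus the degenerate inputs on
-- which both programs still return the same value (p ≤ -2 with a ≥ 1, p = 0 with a ≤ 0,
-- p = 1 with a ≤ 1).  It excludes exactly: inputs where one of the programs loops forever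
-- (A for p = 1, a ≥ 2 and some p = -1, a ≤ 0; B for p ∈ {-1, 0} with a ≥ 1), and the
-- corner p ≤ -1, a ≤ 0, where "exponent of p in M!" is meaningless and A returns an
-- accidental value of its bisection bounds (its lower bound p) that B does not reproduce.
def Pre_compute_M (p : Int) (a : Int) : Prop :=
  2 ≤ p ∨ (p ≤ -2 ∧ 1 ≤ a) ∨ (p = 0 ∧ a ≤ 0) ∨ (p = 1 ∧ a ≤ 1)
instance (p : Int) (a : Int) : Decidable (Pre_compute_M p a) := by unfold Pre_compute_M; infer_instance
def pvWitness_compute_M : Int × Int := (2, 5)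

def Spec_compute_M (p : Int) (a : Int) (out : Int) : Prop := out = compute_M_alt p a
instance (p : Int) (a : Int) (out : Int) : Decidable (Spec_compute_M p a out) := by unfold Spec_compute_M; infer_instance

-- ===== CLAIM (what is proved, stated in full; the proofs are below) =====
def Claim_equal_compute_M : Prop := ∀ (p : Int) (a : Int), Dom_compute_M p a → Pre_compute_M p a → Spec_compute_M p a (compute_M p a)

-- ===== LEMMAS AND PROOFS =====

lemma pv_ediv_lt {p x : Int} (hp : 2 ≤ p) (hx : 1 ≤ x) : x / p < x := by
  have h1 := Int.ediv_mul_le x (show p ≠ 0 by omega)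
  have h0 : 0 ≤ x / p := Int.ediv_nonneg (by omega) (by omega)
  nlinarith

-- ghost: the full Legendre sum  L(x) = Σ_{j ≥ 1} ⌊x / p^j⌋, as recursion on x.
def pvL (p x : Int) : Int :=
  if h : 2 ≤ p ∧ 1 ≤ x then x / p + pvL p (x / p) else 0
termination_by x.toNat
decreasing_by
  have h1 := pv_ediv_lt h.1 h.2
  have h0 : 0 ≤ x / p := Int.ediv_nonneg (by omega) (by omega)
  omega

lemma pvL_zero (p : Int) : pvL p 0 = 0 := by
  rw [pvL]; simp

lemma pvL_eq {p : Int} (hp : 2 ≤ p) (x : Int) (hx : 0 ≤ x) :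
    pvL p x = x / p + pvL p (x / p) := by
  by_cases h1 : 1 ≤ x
  · rw [pvL, dif_pos ⟨hp, h1⟩]
  · have hx0 : x = 0 := by omega
    subst hx0
    simp [pvL_zero]

lemma pvL_nonneg {p : Int} (hp : 2 ≤ p) :
    ∀ (n : Nat) (x : Int), x.toNat ≤ n → 0 ≤ x → 0 ≤ pvL p x := by
  intro n
  induction n with
  | zero =>
    intro x hxn hx
    have : x = 0 := by omega
    subst this; simp [pvL_zero]
  | succ n ih =>
    intro x hxn hx
    by_cases h1 : 1 ≤ x
    · rw [pvL_eq hp x hx]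
      have hq0 : 0 ≤ x / p := Int.ediv_nonneg (by omega) (by omega)
      have hqlt : x / p < x := pv_ediv_lt hp h1
      have := ih (x / p) (by omega) hq0
      omega
    · have : x = 0 := by omega
      subst this; simp [pvL_zero]

lemma pvL_mono {p : Int} (hp : 2 ≤ p) :
    ∀ (n : Nat) (x y : Int), y.toNat ≤ n → 0 ≤ x → x ≤ y → pvL p x ≤ pvL p y := by
  intro n
  induction n with
  | zero =>
    intro x y hyn hx hxy
    have hx0 : x = 0 := by omega
    have hy0 : y = 0 := by omega
    subst hx0; subst hy0; omega
  | succ n ih =>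
    intro x y hyn hx hxy
    by_cases h1 : 1 ≤ y
    · rw [pvL_eq hp x (by omega), pvL_eq hp y (by omega)]
      have hdiv : x / p ≤ y / p := Int.ediv_le_ediv (by omega) hxy
      have hx0 : 0 ≤ x / p := Int.ediv_nonneg (by omega) (by omega)
      have hylt : y / p < y := pv_ediv_lt hp h1
      have hy0 : 0 ≤ y / p := Int.ediv_nonneg (by omega) (by omega)
      have := ih (x / p) (y / p) (by omega) hx0 hdiv
      omega
    · have hy0 : y = 0 := by omega
      have hx0 : x = 0 := by omega
      subst hy0; subst hx0; omega

-- ghost: s i = (p^i - 1)/(p - 1), the exponent one block p^i contributes.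
def pvS (p : Int) : Nat → Int
  | 0 => 0
  | i + 1 => p * pvS p i + 1

lemma pvS_nonneg {p : Int} (hp : 2 ≤ p) : ∀ i : Nat, 0 ≤ pvS p i := by
  intro i
  induction i with
  | zero => simp [pvS]
  | succ i ih =>
    have : 0 ≤ p * pvS p i := mul_nonneg (by omega) ih
    simp only [pvS]; omega

lemma pvS_pos {p : Int} (hp : 2 ≤ p) (k : Nat) : 1 ≤ pvS p (k + 1) := by
  have := pvS_nonneg hp k
  have : 0 ≤ p * pvS p k := mul_nonneg (by omega) this
  simp only [pvS]; omega

lemma pvS_add_pow {p : Int} (hp : 2 ≤ p) : ∀ i : Nat, pvS p (i + 1) = pvS p i + p ^ i := by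
  intro i
  induction i with
  | zero => simp [pvS]
  | succ i ih =>
    calc pvS p (i + 2) = p * pvS p (i + 1) + 1 := rfl
    _ = p * (pvS p i + p ^ i) + 1 := by rw [ih]
    _ = (p * pvS p i + 1) + p ^ (i + 1) := by ring
    _ = pvS p (i + 1) + p ^ (i + 1) := rfl

lemma pvS_mono {p : Int} (hp : 2 ≤ p) {i j : Nat} (hij : i ≤ j) : pvS p i ≤ pvS p j := by
  induction j with
  | zero => simp_all
  | succ j ih =>
    rcases Nat.lt_or_ge i (j + 1) with h | h
    · have h1 := ih (by omega)
      have h2 := pvS_add_pow hp j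
      have h3 : (0:Int) < p ^ j := pow_pos (by omega) j
      omega
    · have : i = j + 1 := by omega
      subst this; omega

-- exact additivity of the Legendre sum on one block: L(c·p^i + y) = c·s(i) + L(y).
lemma pvL_add {p : Int} (hp : 2 ≤ p) :
    ∀ (i : Nat) (c y : Int), 0 ≤ c → c ≤ p - 1 → 0 ≤ y → y < p ^ i →
      pvL p (c * p ^ i + y) = c * pvS p i + pvL p y := by
  intro i
  induction i with
  | zero =>
    intro c y hc0 hcp hy0 hylt
    have hy : y = 0 := by simp at hylt; omega
    subst hy
    have hcdiv : c / p = 0 := Int.ediv_eq_zero_of_lt hc0 (by omega)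
    simp only [pow_zero, mul_one, add_zero, pvS, mul_zero, zero_add]
    rw [pvL_eq hp c hc0, hcdiv, pvL_zero]
    simp
  | succ i ih =>
    intro c y hc0 hcp hy0 hylt
    have hppos : (0:Int) < p := by omega
    have hpowpos : (0:Int) < p ^ i := pow_pos hppos i
    have hx0 : 0 ≤ c * p ^ (i + 1) + y := by positivity
    rw [pvL_eq hp _ hx0]
    have hdiv : (c * p ^ (i + 1) + y) / p = c * p ^ i + y / p := by
      have : c * p ^ (i + 1) + y = y + (c * p ^ i) * p := by ring
      rw [this, Int.add_mul_ediv_right _ _ (show p ≠ 0 by omega)]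
      ring
    have hyp0 : 0 ≤ y / p := Int.ediv_nonneg hy0 (by omega)
    have hyplt : y / p < p ^ i := by
      rw [Int.ediv_lt_iff_lt_mul hppos]
      calc y < p ^ (i + 1) := hylt
      _ = p ^ i * p := by ring
    rw [hdiv, ih c (y / p) hc0 hcp hyp0 hyplt]
    rw [pvL_eq hp y hy0, pvS_add_pow hp i]
    ring

-- ghost: pvV x = number of trailing zero digits of x in base p  (v_p(x)).
def pvV (p x : Int) : Int :=
  if h : 2 ≤ p ∧ 1 ≤ x ∧ x % p = 0 then 1 + pvV p (x / p) else 0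
termination_by x.toNat
decreasing_by
  have h1 := pv_ediv_lt h.1 h.2.1
  have h0 : 0 ≤ x / p := Int.ediv_nonneg (by omega) (by omega)
  omega

lemma pvV_cpow {p : Int} (hp : 2 ≤ p) :
    ∀ (i : Nat) (c : Int), 1 ≤ c → c ≤ p - 1 → pvV p (c * p ^ i) = (i : Int) := by
  intro i
  induction i with
  | zero =>
    intro c hc1 hcp
    have hmod : c % p = c := Int.emod_eq_of_lt (by omega) (by omega)
    have hng : ¬ (2 ≤ p ∧ 1 ≤ c * p ^ 0 ∧ (c * p ^ 0) % p = 0) := by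
      simp only [pow_zero, mul_one]
      intro ⟨_, _, h⟩
      rw [hmod] at h; omega
    rw [pvV, dif_neg hng]
    norm_num
  | succ i ih =>
    intro c hc1 hcp
    have hppos : (0:Int) < p := by omega
    have hpow : (0:Int) < p ^ i := pow_pos hppos i
    have hx1 : 1 ≤ c * p ^ (i + 1) := by
      have : (0:Int) < p ^ (i + 1) := pow_pos hppos (i + 1)
      nlinarith
    have hdvd : p ∣ c * p ^ (i + 1) := ⟨c * p ^ i, by ring⟩
    have hmod : (c * p ^ (i + 1)) % p = 0 := Int.emod_eq_zero_of_dvd hdvd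
    have hdiv : (c * p ^ (i + 1)) / p = c * p ^ i := by
      have : c * p ^ (i + 1) = (c * p ^ i) * p := by ring
      rw [this, Int.mul_ediv_cancel _ (show p ≠ 0 by omega)]
    rw [pvV, dif_pos ⟨hp, hx1, hmod⟩, hdiv, ih c hc1 hcp]
    push_cast; ring

lemma pvV_addsmall {p : Int} (hp : 2 ≤ p) :
    ∀ (i : Nat) (c D : Int), 0 ≤ c → 1 ≤ D → D < p ^ (i + 1) →
      pvV p (c * p ^ (i + 1) + D) = pvV p D := by
  intro i
  induction i with
  | zero =>
    intro c D hc0 hD1 hDlt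
    simp only [Nat.zero_add] at hDlt ⊢
    simp only [pow_one] at hDlt
    have hmodD : D % p = D := Int.emod_eq_of_lt (by omega) hDlt
    have hmodx : (c * p ^ 1 + D) % p = D % p := by
      have : c * p ^ 1 + D = D + c * p := by ring
      rw [this, Int.add_mul_emod_self_right]
    have hng1 : ¬ (2 ≤ p ∧ 1 ≤ c * p ^ 1 + D ∧ (c * p ^ 1 + D) % p = 0) := by
      intro ⟨_, _, h⟩; rw [hmodx, hmodD] at h; omega
    have hng2 : ¬ (2 ≤ p ∧ 1 ≤ D ∧ D % p = 0) := by
      intro ⟨_, _, h⟩; rw [hmodD] at h; omega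
    rw [pvV, dif_neg hng1, pvV, dif_neg hng2]
  | succ i ih =>
    intro c D hc0 hD1 hDlt
    have hppos : (0:Int) < p := by omega
    by_cases hmod : D % p = 0
    · have hdvd : p ∣ D := Int.dvd_of_emod_eq_zero hmod
      have hDp : p ≤ D := Int.le_of_dvd (by omega) hdvd
      have hq1 : 1 ≤ D / p := by
        rw [Int.le_ediv_iff_mul_le hppos]; omega
      have hmodx : (c * p ^ (i + 2) + D) % p = 0 := by
        have h1 : c * p ^ (i + 2) + D = D + (c * p ^ (i + 1)) * p := by ring
        rw [h1, Int.add_mul_emod_self_right, hmod]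
      have hx1 : 1 ≤ c * p ^ (i + 2) + D := by
        have : (0:Int) ≤ c * p ^ (i + 2) := by positivity
        omega
      have hdivx : (c * p ^ (i + 2) + D) / p = c * p ^ (i + 1) + D / p := by
        have h1 : c * p ^ (i + 2) + D = D + (c * p ^ (i + 1)) * p := by ring
        rw [h1, Int.add_mul_ediv_right _ _ (show p ≠ 0 by omega)]
        ring
      have hqlt : D / p < p ^ (i + 1) := by
        rw [Int.ediv_lt_iff_lt_mul hppos]
        calc D < p ^ (i + 2) := hDlt
        _ = p ^ (i + 1) * p := by ring
      have hVx : pvV p (c * p ^ (i + 2) + D) = 1 + pvV p (c * p ^ (i + 1) + D / p) := by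
        rw [pvV, dif_pos ⟨hp, hx1, hmodx⟩, hdivx]
      have hVD : pvV p D = 1 + pvV p (D / p) := by
        rw [pvV, dif_pos ⟨hp, hD1, hmod⟩]
      rw [hVx, hVD, ih c (D / p) hc0 hq1 hqlt]
    · have hmodx : (c * p ^ (i + 2) + D) % p = D % p := by
        have h1 : c * p ^ (i + 2) + D = D + (c * p ^ (i + 1)) * p := by ring
        rw [h1, Int.add_mul_emod_self_right]
      have hng1 : ¬ (2 ≤ p ∧ 1 ≤ c * p ^ (i + 2) + D ∧ (c * p ^ (i + 2) + D) % p = 0) := by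
        intro ⟨_, _, h⟩; rw [hmodx] at h; exact hmod h
      have hng2 : ¬ (2 ≤ p ∧ 1 ≤ D ∧ D % p = 0) := by
        intro ⟨_, _, h⟩; exact hmod h
      rw [pvV, dif_neg hng1, pvV, dif_neg hng2]

-- L(x - 1) = L(x) - v_p(x): removing the top factorial factor.
lemma pvL_pred {p : Int} (hp : 2 ≤ p) :
    ∀ (n : Nat) (x : Int), x.toNat ≤ n → 1 ≤ x → pvL p (x - 1) = pvL p x - pvV p x := by
  intro n
  induction n with
  | zero => intro x hxn hx; omega
  | succ n ih =>
    intro x hxn hx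
    have hppos : (0:Int) < p := by omega
    have hq0 : 0 ≤ x / p := Int.ediv_nonneg (by omega) (by omega)
    have hqlt : x / p < x := pv_ediv_lt hp hx
    have hmodlt : x % p < p := Int.emod_lt_of_pos x hppos
    have hmod0 : 0 ≤ x % p := Int.emod_nonneg x (by omega)
    have hxe : p * (x / p) + x % p = x := Int.ediv_add_emod x p
    by_cases hmod : x % p = 0
    · -- p divides x
      have hdvd : p ∣ x := Int.dvd_of_emod_eq_zero hmod
      have hxp : p ≤ x := Int.le_of_dvd (by omega) hdvd
      have hq1 : 1 ≤ x / p := by rw [Int.le_ediv_iff_mul_le hppos]; omega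
      have hdivx : (x - 1) / p = x / p - 1 := by
        have h1 : x - 1 = (p - 1) + (x / p - 1) * p := by linear_combination -hxe + hmod
        rw [h1, Int.add_mul_ediv_right _ _ (show p ≠ 0 by omega),
          Int.ediv_eq_zero_of_lt (by omega) (by omega)]
        ring
      have hV : pvV p x = 1 + pvV p (x / p) := by
        rw [pvV, dif_pos ⟨hp, hx, hmod⟩]
      rw [pvL_eq hp (x - 1) (by omega), hdivx, ih (x / p) (by omega) hq1,
        pvL_eq hp x (by omega), hV]
      omega
    · -- p does not divide x
      have hdivx : (x - 1) / p = x / p := by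
        have h1 : x - 1 = (x % p - 1) + (x / p) * p := by linear_combination -hxe
        rw [h1, Int.add_mul_ediv_right _ _ (show p ≠ 0 by omega),
          Int.ediv_eq_zero_of_lt (by omega) (by omega)]
        ring
      have hV : pvV p x = 0 := by
        rw [pvV, dif_neg (by intro ⟨_, _, h⟩; exact hmod h)]
      rw [pvL_eq hp (x - 1) (by omega), hdivx, pvL_eq hp x (by omega), hV]
      omega

-- ghost version of B's inner loop.
def pvCG (p need power s : Int) : Int × Int :=
  if h : 2 ≤ p ∧ 1 ≤ s ∧ s * p + 1 ≤ need then pvCG p need (power * p) (s * p + 1)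
  else (power, s)
termination_by (need - s).toNat
decreasing_by
  have h1 : s * 2 ≤ s * p := mul_le_mul_of_nonneg_left h.1 (by omega)
  omega

lemma pvCG_spec {p : Int} (hp : 2 ≤ p) :
    ∀ (fuel : Nat) (need : Int) (k : Nat), (need - pvS p (k + 1)).toNat ≤ fuel →
      pvS p (k + 1) ≤ need →
      ∃ j : Nat, pvCG p need (p ^ (k + 1)) (pvS p (k + 1)) = (p ^ (j + 1), pvS p (j + 1)) ∧
        pvS p (j + 1) ≤ need ∧ need < p * pvS p (j + 1) + 1 := by
  intro fuel
  induction fuel with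
  | zero =>
    intro need k hfuel hle
    have hs1 := pvS_pos hp k
    have hng : ¬ (2 ≤ p ∧ 1 ≤ pvS p (k + 1) ∧ pvS p (k + 1) * p + 1 ≤ need) := by
      intro ⟨_, _, h⟩
      have : pvS p (k + 1) * 2 ≤ pvS p (k + 1) * p := mul_le_mul_of_nonneg_left hp (by omega)
      omega
    rw [pvCG, dif_neg hng]
    refine ⟨k, rfl, hle, ?_⟩
    have h2 : pvS p (k + 1) * 2 ≤ pvS p (k + 1) * p := mul_le_mul_of_nonneg_left hp (by omega)
    have h3 : pvS p (k + 1) * p = p * pvS p (k + 1) := by ring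
    omega
  | succ fuel ih =>
    intro need k hfuel hle
    have hs1 := pvS_pos hp k
    by_cases hcond : pvS p (k + 1) * p + 1 ≤ need
    · rw [pvCG, dif_pos ⟨hp, hs1, hcond⟩]
      have hpow : p ^ (k + 1) * p = p ^ (k + 2) := by ring
      have hs : pvS p (k + 1) * p + 1 = pvS p (k + 2) := by
        simp only [pvS]; ring
      rw [hpow, hs]
      have hs2 := pvS_pos hp (k + 1)
      have hmono : pvS p (k + 1) + 1 ≤ pvS p (k + 2) := by
        have h2 : pvS p (k + 1) * 2 ≤ pvS p (k + 1) * p := mul_le_mul_of_nonneg_left hp (by omega)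
        omega
      have hk2 : pvS p (k + 1 + 1) = pvS p (k + 2) := rfl
      exact ih need (k + 1) (by omega) (by omega)
    · rw [pvCG, dif_neg (by intro ⟨_, _, h⟩; exact hcond h)]
      refine ⟨k, rfl, hle, by
        have h3 : pvS p (k + 1) * p = p * pvS p (k + 1) := by ring
        omega⟩

lemma pvCG_top {p need : Int} (hp : 2 ≤ p) (hn : 1 ≤ need) :
    ∃ j : Nat, pvCG p need p 1 = (p ^ (j + 1), pvS p (j + 1)) ∧
      pvS p (j + 1) ≤ need ∧ need < p * pvS p (j + 1) + 1 := by
  have h1 : pvS p 1 = 1 := by simp [pvS]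
  have h2 : p ^ 1 = p := pow_one p
  have h0 : pvS p (0 + 1) = pvS p 1 := rfl
  have := pvCG_spec hp (need - pvS p 1).toNat need 0 (by omega) (by omega)
  rw [h1, h2] at this
  simpa [h1] using this

-- ghost version of B's outer loop (returns the constructed M for p ≥ 2, need ≥ 1).
def pvG (p need : Int) : Int :=
  if h : 2 ≤ p ∧ 1 ≤ need then
    need / (pvCG p need p 1).2 * (pvCG p need p 1).1 +
      pvG p (need - need / (pvCG p need p 1).2 * (pvCG p need p 1).2)
  else 0
termination_by need.toNat
decreasing_by
  obtain ⟨j, hEq, hle, _⟩ := pvCG_top h.1 h.2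
  have hs1 := pvS_pos h.1 j
  rw [hEq]
  simp only
  have hc1 : 1 ≤ need / pvS p (j + 1) := by
    rw [Int.le_ediv_iff_mul_le (by omega)]; omega
  have hcs : need / pvS p (j + 1) * pvS p (j + 1) ≤ need :=
    Int.ediv_mul_le need (by omega)
  have hcs1 : 1 ≤ need / pvS p (j + 1) * pvS p (j + 1) := by nlinarith
  omega

lemma pvG_zero {p need : Int} (h : need ≤ 0) : pvG p need = 0 := by
  rw [pvG, dif_neg (by omega)]

-- one unfolding of the ghost greedy loop, with the block characterised.
lemma pvG_step {p need : Int} (hp : 2 ≤ p) (hn : 1 ≤ need) :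
    ∃ (k : Nat) (c : Int), c = need / pvS p (k + 1) ∧
      pvG p need = c * p ^ (k + 1) + pvG p (need - c * pvS p (k + 1)) ∧
      pvS p (k + 1) ≤ need ∧ need < p * pvS p (k + 1) + 1 := by
  obtain ⟨j, hEq, hle, hlt⟩ := pvCG_top hp hn
  refine ⟨j, need / pvS p (j + 1), rfl, ?_, hle, hlt⟩
  rw [pvG, dif_pos ⟨hp, hn⟩, hEq]

-- basic bounds for one greedy step: 1 ≤ c ≤ p and 0 ≤ n - c·S < S.
lemma pv_step_bounds {p n S : Int} (hp : 2 ≤ p) (hS : 1 ≤ S) (hle : S ≤ n)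
    (hlt : n < p * S + 1) :
    1 ≤ n / S ∧ n / S ≤ p ∧ 0 ≤ n - n / S * S ∧ n - n / S * S < S := by
  have hSpos : (0:Int) < S := by omega
  have hc1 : 1 ≤ n / S := by rw [Int.le_ediv_iff_mul_le hSpos]; omega
  have hcp : n / S ≤ p := by
    have h1 : n / S ≤ p * S / S := Int.ediv_le_ediv hSpos (by omega)
    have h2 : p * S / S = p := Int.mul_ediv_cancel p (by omega)
    omega
  have he := Int.ediv_add_emod n S
  have hm0 : 0 ≤ n % S := Int.emod_nonneg n (by omega)
  have hmlt : n % S < S := Int.emod_lt_of_pos n hSpos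
  constructor; · exact hc1
  constructor; · exact hcp
  constructor; · nlinarith [Int.ediv_mul_le n (show S ≠ 0 by omega)]
  nlinarith

-- the greedy result is at most p^i as long as the target is below s(i).
lemma pvG_le {p : Int} (hp : 2 ≤ p) :
    ∀ (n : Nat) (m : Int), m.toNat ≤ n → ∀ i : Nat, m < pvS p i → pvG p m ≤ p ^ i := by
  intro n
  induction n with
  | zero =>
    intro m hmn i hmlt
    have hm : m ≤ 0 := by omega
    rw [pvG_zero hm]
    positivity
  | succ n ih =>
    intro m hmn i hmlt
    by_cases hm1 : 1 ≤ m
    · obtain ⟨k, c, hc, hG, hle, hlt⟩ := pvG_step hp hm1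
      have hs1 := pvS_pos hp k
      obtain ⟨hc1, hcp, hr0, hrlt⟩ := pv_step_bounds hp hs1 hle hlt
      rw [← hc] at hc1 hcp hr0 hrlt
      -- k + 2 ≤ i
      have hki : k + 2 ≤ i := by
        by_contra hcon
        have : i ≤ k + 1 := by omega
        have := pvS_mono hp this (p := p)
        omega
      set m' := m - c * pvS p (k + 1) with hm'
      have hm'lt : m' < m := by nlinarith
      have hG' : pvG p m' ≤ p ^ (k + 1) := ih m' (by omega) (k + 1) (by omega)
      have hpowpos : (0:Int) < p ^ (k + 1) := pow_pos (by omega) _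
      have hstep : pvG p m ≤ (c + 1) * p ^ (k + 1) := by
        rw [hG]; nlinarith
      rcases (show c ≤ p - 1 ∨ c = p by omega) with hcase | hcase
      · have h1 : (c + 1) * p ^ (k + 1) ≤ p * p ^ (k + 1) := by nlinarith
        have h2 : p * p ^ (k + 1) = p ^ (k + 2) := by ring
        have h3 : p ^ (k + 2) ≤ p ^ i := pow_le_pow_right₀ (by omega) (by omega)
        omega
      · -- c = p forces m = p·S and remainder 0
        have hSpos : (0:Int) < pvS p (k + 1) := by omega
        have hple : p ≤ m / pvS p (k + 1) := by rw [← hc, hcase]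
        have hpm : p * pvS p (k + 1) ≤ m := (Int.le_ediv_iff_mul_le hSpos).mp hple
        have h1 : m = p * pvS p (k + 1) := by omega
        have hm'0 : m' = 0 := by rw [hm', hcase]; linarith
        rw [hG, hm'0, pvG_zero (by omega), hcase]
        have h2 : p * p ^ (k + 1) = p ^ (k + 2) := by ring
        have h3 : p ^ (k + 2) ≤ p ^ i := pow_le_pow_right₀ (by omega) (by omega)
        omega
    · rw [pvG_zero (by omega)]
      positivity

-- main greedy invariant: the result D has  p ≤ D,  n ≤ L(D)  and  L(D) < n + v_p(D).
lemma pvG_main {p : Int} (hp : 2 ≤ p) :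
    ∀ (fuel : Nat) (n : Int), n.toNat ≤ fuel → 1 ≤ n →
      p ≤ pvG p n ∧ n ≤ pvL p (pvG p n) ∧ pvL p (pvG p n) < n + pvV p (pvG p n) := by
  intro fuel
  induction fuel with
  | zero => intro n h1 h2; omega
  | succ fuel ih =>
    intro n hn1 hn
    obtain ⟨k, c, hc, hG, hle, hlt⟩ := pvG_step hp hn
    have hs1 := pvS_pos hp k
    obtain ⟨hc1, hcp, hr0, hrlt⟩ := pv_step_bounds hp hs1 hle hlt
    rw [← hc] at hc1 hcp hr0 hrlt
    set S := pvS p (k + 1) with hS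
    set n' := n - c * S with hn'
    have hpowpos : (0:Int) < p ^ (k + 1) := pow_pos (by omega) _
    have hppk : p ≤ p ^ (k + 1) := by
      calc p = p ^ 1 := (pow_one p).symm
      _ ≤ p ^ (k + 1) := pow_le_pow_right₀ (by omega) (by omega)
    have hSk2 : pvS p (k + 2) = p * S + 1 := rfl
    have hLpow2 : pvL p (p ^ (k + 2)) = pvS p (k + 2) := by
      have h := pvL_add hp (k + 2) 1 0 (by omega) (by omega) (le_refl 0)
        (pow_pos (by omega) (k + 2))
      simpa [pvL_zero] using h
    have hVpow2 : pvV p (p ^ (k + 2)) = ((k + 2 : Nat) : Int) := by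
      have h := pvV_cpow hp (k + 2) 1 (le_refl 1) (by omega)
      simpa using h
    by_cases hcase0 : 1 ≤ n'
    · -- remainder present
      have hcs1 : 1 ≤ c * S := by
        have h := mul_le_mul_of_nonneg_right hc1 (show (0:Int) ≤ S by omega)
        rw [one_mul] at h; linarith
      have hn'lt : n' < n := by omega
      obtain ⟨hD'p, hD'L, hD'V⟩ := ih n' (by omega) hcase0
      set D' := pvG p n' with hD'
      have hD'le : D' ≤ p ^ (k + 1) := pvG_le hp n'.toNat n' (le_refl _) (k + 1) (by omega)
      have hcp1 : c ≤ p - 1 := by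
        by_contra hcon
        have hcp' : c = p := by omega
        have hple : p ≤ n / S := by rw [← hc, hcp']
        have hmul := (Int.le_ediv_iff_mul_le (show (0:Int) < S by omega)).mp hple
        have hz : n' = 0 := by rw [hn', hcp']; linarith
        omega
      rcases lt_or_eq_of_le hD'le with hlt' | heq'
      · -- D' < p^(k+1): exact additivity, same valuation
        have hL : pvL p (pvG p n) = c * S + pvL p D' := by
          rw [hG]; exact pvL_add hp (k + 1) c D' (by omega) hcp1 (by omega) hlt'
        have hV : pvV p (pvG p n) = pvV p D' := by
          rw [hG]; exact pvV_addsmall hp k c D' (by omega) (by omega) hlt'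
        refine ⟨?_, ?_, ?_⟩
        · rw [hG]
          have h := mul_le_mul_of_nonneg_right hc1 (le_of_lt hpowpos)
          rw [one_mul] at h; linarith
        · rw [hL]; linarith
        · rw [hL, hV]; linarith
      · -- D' = p^(k+1)
        have hLpow : pvL p (p ^ (k + 1)) = S := by
          have h := pvL_add hp (k + 1) 1 0 (by omega) (by omega) (le_refl 0) hpowpos
          simpa [pvL_zero, hS] using h
        have hVpow : pvV p (p ^ (k + 1)) = ((k + 1 : Nat) : Int) := by
          have h := pvV_cpow hp (k + 1) 1 (le_refl 1) (by omega)
          simpa using h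
        have hstar : S < n' + (k + 1 : Nat) := by
          rw [← heq'] at hLpow hVpow
          rw [hLpow, hVpow] at hD'V
          exact_mod_cast hD'V
        rcases (show c + 1 ≤ p - 1 ∨ c + 1 = p by omega) with hcc | hcc
        · have hGv : pvG p n = (c + 1) * p ^ (k + 1) + 0 := by rw [hG, heq']; ring
          have hL : pvL p (pvG p n) = (c + 1) * S + 0 := by
            rw [hGv, pvL_add hp (k + 1) (c + 1) 0 (by omega) hcc (le_refl 0) hpowpos,
              pvL_zero]
          have hV : pvV p (pvG p n) = ((k + 1 : Nat) : Int) := by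
            rw [hGv, add_zero]; exact pvV_cpow hp (k + 1) (c + 1) (by omega) hcc
          have hexp : (c + 1) * S = c * S + S := by ring
          refine ⟨?_, ?_, ?_⟩
          · rw [hGv]
            have h := mul_le_mul_of_nonneg_right (show (1:Int) ≤ c + 1 by omega)
              (le_of_lt hpowpos)
            rw [one_mul] at h; linarith
          · rw [hL, hexp]; linarith
          · rw [hL, hV, hexp]; push_cast at hstar ⊢; linarith
        · have hGv : pvG p n = p ^ (k + 2) := by
            rw [hG, heq']
            calc c * p ^ (k + 1) + p ^ (k + 1) = (c + 1) * p ^ (k + 1) := by ring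
            _ = p * p ^ (k + 1) := by rw [hcc]
            _ = p ^ (k + 2) := by ring
          refine ⟨?_, ?_, ?_⟩
          · rw [hGv]
            calc p = p ^ 1 := (pow_one p).symm
            _ ≤ p ^ (k + 2) := pow_le_pow_right₀ (by omega) (by omega)
          · rw [hGv, hLpow2, hSk2]
            have hcc' : c = p - 1 := by omega
            have hexp : c * S = p * S - S := by rw [hcc']; ring
            linarith
          · rw [hGv, hLpow2, hVpow2, hSk2]
            have hcc' : c = p - 1 := by omega
            have hexp : c * S = p * S - S := by rw [hcc']; ring
            push_cast at hstar ⊢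
            linarith
    · -- no remainder: n = c·S
      have hz : n' = 0 := by omega
      have hGv : pvG p n = c * p ^ (k + 1) := by
        rw [hG, hz, pvG_zero (by omega), add_zero]
      have hnc : n = c * S := by omega
      rcases (show c ≤ p - 1 ∨ c = p by omega) with hcc | hcc
      · have hL : pvL p (pvG p n) = c * S + 0 := by
          rw [hGv]
          have h := pvL_add hp (k + 1) c 0 (by omega) hcc (le_refl 0) hpowpos
          simpa [pvL_zero] using h
        have hV : pvV p (pvG p n) = ((k + 1 : Nat) : Int) := by
          rw [hGv]; exact pvV_cpow hp (k + 1) c hc1 hcc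
        refine ⟨?_, ?_, ?_⟩
        · rw [hGv]
          have h := mul_le_mul_of_nonneg_right hc1 (le_of_lt hpowpos)
          rw [one_mul] at h; linarith
        · rw [hL]; linarith
        · rw [hL, hV]; push_cast; linarith
      · have hGv2 : pvG p n = p ^ (k + 2) := by
          rw [hGv, hcc]; ring
        refine ⟨?_, ?_, ?_⟩
        · rw [hGv2]
          calc p = p ^ 1 := (pow_one p).symm
          _ ≤ p ^ (k + 2) := pow_le_pow_right₀ (by omega) (by omega)
        · rw [hGv2, hLpow2, hSk2, hnc, hcc]; linarith
        · rw [hGv2, hLpow2, hVpow2, hSk2, hnc, hcc]; push_cast; linarith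

-- minimality: everything strictly below the greedy result has exponent < n.
lemma pvG_min {p : Int} (hp : 2 ≤ p) (n x : Int) (hn : 1 ≤ n) (hx0 : 0 ≤ x)
    (hxD : x < pvG p n) : pvL p x < n := by
  obtain ⟨hDp, hDL, hDV⟩ := pvG_main hp n.toNat n (le_refl _) hn
  have h1 : pvL p (pvG p n - 1) = pvL p (pvG p n) - pvV p (pvG p n) :=
    pvL_pred hp (pvG p n).toNat (pvG p n) (le_refl _) (by omega)
  have h2 : pvL p x ≤ pvL p (pvG p n - 1) :=
    pvL_mono hp (pvG p n - 1).toNat x (pvG p n - 1) (le_refl _) hx0 (by omega)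
  omega

-- ghost: A's truncated inner sum  Σ_{j} ⌊mid / (power·p^j)⌋ (while power·p^j ≤ mid).
def pvTrunc (p mid power : Int) : Int :=
  if h : 2 ≤ p ∧ 1 ≤ power ∧ power ≤ mid then mid / power + pvTrunc p mid (power * p)
  else 0
termination_by (mid + 1 - power).toNat
decreasing_by
  have h1 : power * 2 ≤ power * p := mul_le_mul_of_nonneg_left h.1 (by omega)
  omega

lemma pvLegAux_eq {p : Int} (hp : 2 ≤ p) :
    ∀ (fuel : Nat) (t power mid : Int), 0 ≤ mid → 1 ≤ power →
      (mid + 1 - power).toNat ≤ fuel →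
      pvLegAux p mid fuel t power = t + pvTrunc p mid power := by
  intro fuel
  induction fuel with
  | zero =>
    intro t power mid hmid hpow hfuel
    rw [pvTrunc, dif_neg (by omega)]
    simp [pvLegAux]
  | succ fuel ih =>
    intro t power mid hmid hpow hfuel
    by_cases hcond : power ≤ mid
    · have hmul : power * 2 ≤ power * p := mul_le_mul_of_nonneg_left hp (by omega)
      have hfd : Int.fdiv mid power = mid / power := Int.fdiv_eq_ediv_of_nonneg _ (by omega)
      simp only [pvLegAux, if_pos hcond]
      rw [ih (t + Int.fdiv mid power) (power * p) mid hmid (by nlinarith) (by omega)]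
      have hT : pvTrunc p mid power = mid / power + pvTrunc p mid (power * p) := by
        rw [pvTrunc, dif_pos ⟨hp, hpow, hcond⟩]
      rw [hT, hfd]
      ring
    · simp only [pvLegAux, if_neg hcond]
      rw [pvTrunc, dif_neg (by omega)]
      ring

lemma pvTrunc_shift {p : Int} (hp : 2 ≤ p) :
    ∀ (fuel : Nat) (power mid : Int), 0 ≤ mid → 1 ≤ power →
      (mid + 1 - power).toNat ≤ fuel →
      pvTrunc p mid (power * p) = pvTrunc p (mid / p) power := by
  intro fuel
  induction fuel with
  | zero =>
    intro power mid hmid hpow hfuel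
    have hdivle : mid / p ≤ mid := Int.ediv_le_self p hmid
    have hmul : power * 2 ≤ power * p := mul_le_mul_of_nonneg_left hp (by omega)
    rw [pvTrunc, dif_neg (by omega), pvTrunc, dif_neg (by omega)]
  | succ fuel ih =>
    intro power mid hmid hpow hfuel
    have hppos : (0:Int) < p := by omega
    have hmul : power * 2 ≤ power * p := mul_le_mul_of_nonneg_left hp (by omega)
    have hiff : power ≤ mid / p ↔ power * p ≤ mid := Int.le_ediv_iff_mul_le hppos
    by_cases hcond : power * p ≤ mid
    · have hdd : mid / (power * p) = mid / p / power := by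
        rw [Int.ediv_ediv_of_nonneg (by omega), mul_comm power p]
      have hpp : 1 ≤ power * p := by nlinarith
      have hL1 : pvTrunc p mid (power * p) =
          mid / (power * p) + pvTrunc p mid (power * p * p) := by
        rw [pvTrunc, dif_pos ⟨hp, hpp, hcond⟩]
      have hR1 : pvTrunc p (mid / p) power =
          mid / p / power + pvTrunc p (mid / p) (power * p) := by
        rw [pvTrunc, dif_pos ⟨hp, hpow, hiff.mpr hcond⟩]
      rw [hL1, hR1, hdd, ih (power * p) mid hmid (by omega) (by omega)]
    · rw [pvTrunc, dif_neg (by omega), pvTrunc,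
        dif_neg (by intro ⟨_, _, h⟩; exact hcond (hiff.mp h))]

lemma pvTrunc_eq_L {p : Int} (hp : 2 ≤ p) :
    ∀ (n : Nat) (mid : Int), mid.toNat ≤ n → 0 ≤ mid → pvTrunc p mid p = pvL p mid := by
  intro n
  induction n with
  | zero =>
    intro mid hn h0
    have : mid = 0 := by omega
    subst this
    rw [pvTrunc, dif_neg (by omega), pvL_zero]
  | succ n ih =>
    intro mid hn h0
    by_cases hcond : p ≤ mid
    · have hqlt : mid / p < mid := pv_ediv_lt hp (by omega)
      have hq0 : 0 ≤ mid / p := Int.ediv_nonneg (by omega) (by omega)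
      rw [pvTrunc, dif_pos ⟨hp, by omega, hcond⟩,
        pvTrunc_shift hp (mid + 1 - p).toNat p mid h0 (by omega) (le_refl _),
        ih (mid / p) (by omega) hq0, pvL_eq hp mid h0]
    · have hq : mid / p = 0 := Int.ediv_eq_zero_of_lt h0 (by omega)
      rw [pvTrunc, dif_neg (by omega), pvL_eq hp mid h0, hq, pvL_zero]
      ring

-- A's binary search finds the least M in [low, high] with pvL M ≥ a.
lemma pvLoopA_spec {p a : Int} (hp : 2 ≤ p) :
    ∀ (n : Nat) (low high : Int), (high - low).toNat ≤ n → 0 ≤ low → low ≤ high →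
      a ≤ pvL p high →
      low ≤ pvLoopA p a low high ∧ pvLoopA p a low high ≤ high ∧
        a ≤ pvL p (pvLoopA p a low high) ∧
        ∀ x, low ≤ x → x < pvLoopA p a low high → pvL p x < a := by
  intro n
  induction n with
  | zero =>
    intro low high hn h0 hlh hQ
    have : low = high := by omega
    subst this
    rw [pvLoopA, dif_neg (lt_irrefl low)]
    exact ⟨le_refl _, le_refl _, hQ, by intro x hx1 hx2; omega⟩
  | succ n ih =>
    intro low high hn h0 hlh hQ
    by_cases hlt : low < high
    · have hfd : Int.fdiv (low + high) 2 = (low + high) / 2 :=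
        Int.fdiv_eq_ediv_of_nonneg _ (by norm_num)
      rw [pvLoopA, dif_pos hlt, hfd]
      set mid := (low + high) / 2 with hmid
      have hb1 : low ≤ mid := by omega
      have hb2 : mid < high := by omega
      have hmid0 : 0 ≤ mid := by omega
      have hleg : pvLegAux p mid (mid.toNat + 1) 0 p = pvL p mid := by
        rw [pvLegAux_eq hp (mid.toNat + 1) 0 p mid hmid0 (by omega) (by omega),
          pvTrunc_eq_L hp mid.toNat mid (le_refl _) hmid0]
        ring
      rw [hleg]
      by_cases hQm : a ≤ pvL p mid
      · rw [if_pos hQm]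
        exact (ih low mid (by omega) h0 hb1 hQm).imp id (fun h => ⟨by omega, h.2⟩)
      · rw [if_neg hQm]
        obtain ⟨h1, h2, h3, h4⟩ := ih (mid + 1) high (by omega) (by omega) (by omega) hQ
        refine ⟨by omega, h2, h3, ?_⟩
        intro x hx1 hx2
        by_cases hxm : x ≤ mid
        · have := pvL_mono hp mid.toNat x mid (le_refl _) (by omega) hxm
          omega
        · exact h4 x (by omega) hx2
    · have : low = high := by omega
      subst this
      rw [pvLoopA, dif_neg (lt_irrefl low)]
      exact ⟨le_refl _, le_refl _, hQ, by intro x hx1 hx2; omega⟩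

-- the fueled port of B's inner loop agrees with the ghost version.
lemma pvChoose_eq {p : Int} (hp : 2 ≤ p) :
    ∀ (fuel : Nat) (need power s : Int), 1 ≤ s → (need - s).toNat ≤ fuel →
      pvChoose p need fuel power s = pvCG p need power s := by
  intro fuel
  induction fuel with
  | zero =>
    intro need power s hs hfuel
    have hmul : s * 2 ≤ s * p := mul_le_mul_of_nonneg_left hp (by omega)
    rw [pvCG, dif_neg (by omega)]
    rfl
  | succ fuel ih =>
    intro need power s hs hfuel
    have hmul : s * 2 ≤ s * p := mul_le_mul_of_nonneg_left hp (by omega)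
    by_cases hcond : s * p + 1 ≤ need
    · have hR : pvCG p need power s = pvCG p need (power * p) (s * p + 1) := by
        rw [pvCG, dif_pos ⟨hp, hs, hcond⟩]
      simp only [pvChoose, if_pos hcond]
      rw [ih need (power * p) (s * p + 1) (by omega) (by omega), ← hR]
    · simp only [pvChoose, if_neg hcond]
      rw [pvCG, dif_neg (by intro ⟨_, _, h⟩; exact hcond h)]

-- the fueled port of B's outer loop agrees with the ghost version.
lemma pvGreedy_eq {p : Int} (hp : 2 ≤ p) :
    ∀ (fuel : Nat) (M need : Int), need.toNat ≤ fuel →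
      pvGreedy p fuel M need = M + pvG p need := by
  intro fuel
  induction fuel with
  | zero =>
    intro M need hfuel
    rw [pvG_zero (by omega)]
    simp [pvGreedy]
  | succ fuel ih =>
    intro M need hfuel
    by_cases hpos : 0 < need
    · have hch : pvChoose p need need.toNat p 1 = pvCG p need p 1 :=
        pvChoose_eq hp need.toNat need p 1 (le_refl 1) (by omega)
      obtain ⟨j, hEq, hle, hltj⟩ := pvCG_top (p := p) (need := need) hp (by omega)
      have hs1 := pvS_pos hp j
      obtain ⟨hc1, hcp, hr0, hrlt⟩ := pv_step_bounds hp hs1 hle hltj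
      have hfdv : Int.fdiv need (pvS p (j + 1)) = need / pvS p (j + 1) :=
        Int.fdiv_eq_ediv_of_nonneg _ (by omega)
      have hcs1 : 1 ≤ need / pvS p (j + 1) * pvS p (j + 1) := by nlinarith
      have hGn : pvG p need = need / pvS p (j + 1) * p ^ (j + 1) +
          pvG p (need - need / pvS p (j + 1) * pvS p (j + 1)) := by
        rw [pvG, dif_pos ⟨hp, show (1:Int) ≤ need by omega⟩, hEq]
      simp only [pvGreedy, if_pos hpos, hch, hEq]
      rw [hfdv, ih (M + need / pvS p (j + 1) * p ^ (j + 1))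
        (need - need / pvS p (j + 1) * pvS p (j + 1)) (by
          set e := need / pvS p (j + 1) * pvS p (j + 1) with he
          omega), hGn]
      ring
    · rw [pvG_zero (by omega)]
      simp [pvGreedy, if_neg hpos]

-- === the degenerate regions of Pre_ ===

-- for p ≤ -2 the inner loop of B exits with a negative s and a power ≥ p².
lemma pvChoose_neg {p need : Int} (hp : p ≤ -2) :
    ∀ (fuel : Nat) (power s : Int), 1 ≤ s → s ≤ need → power ≤ p →
      (need - s).toNat + 1 ≤ fuel →
      ∃ P S : Int, pvChoose p need fuel power s = (P, S) ∧ S ≤ -1 ∧ p * p ≤ P := by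
  intro fuel
  induction fuel using Nat.strong_induction_on with
  | _ fuel ih =>
    intro power s hs hsn hpow hfuel
    have hsp : s * p ≤ p := by
      have h1 : (s - 1) * p ≤ 0 := mul_nonpos_of_nonneg_of_nonpos (by omega) (by omega)
      have h2 : (s - 1) * p = s * p - p := by ring
      linarith
    have hcond1 : s * p + 1 ≤ need := by omega
    have hS1 : s * p + 1 ≤ -1 := by omega
    have hP1 : p * p ≤ power * p := mul_le_mul_of_nonpos_right hpow (by omega)
    cases fuel with
    | zero => omega
    | succ f =>
      simp only [pvChoose, if_pos hcond1]
      cases f with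
      | zero => exact ⟨power * p, s * p + 1, rfl, hS1, hP1⟩
      | succ f' =>
        by_cases hcond2 : (s * p + 1) * p + 1 ≤ need
        · simp only [pvChoose, if_pos hcond2]
          have hpp1 : 2 ≤ p * (p + 1) := by nlinarith
          have hs2 : 2 * s + 1 ≤ (s * p + 1) * p + 1 := by
            have h3 : (s - 1) * (p * p - 2) ≥ 0 :=
              mul_nonneg (by omega) (by nlinarith)
            nlinarith
          have hpow2 : power * p * p ≤ p := by
            have h4 : power * p * p ≤ p * p * p := mul_le_mul_of_nonpos_right hP1 (by omega)
            have h5 : p * p * p ≤ p := by nlinarith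
            linarith
          exact ih f' (by omega) (power * p * p) ((s * p + 1) * p + 1) (by omega)
            (by omega) hpow2 (by omega)
        · simp only [pvChoose, if_neg hcond2]
          exact ⟨power * p, s * p + 1, rfl, hS1, hP1⟩

-- floor division of a positive number by a negative one: quotient ≤ -1, remainder ≤ 0.
lemma pv_fdiv_neg {a S : Int} (ha : 1 ≤ a) (hS : S ≤ -1) :
    Int.fdiv a S ≤ -1 ∧ a - Int.fdiv a S * S ≤ 0 := by
  have hfd := Int.fdiv_eq_ediv (a := a) (b := S)
  have hem : a % S = a % (-S) := by
    have := Int.emod_neg a (-S)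
    simpa using this.symm
  have h1 : 0 ≤ a % S := Int.emod_nonneg a (by omega)
  have h2 : a % S < -S := by
    rw [hem]; exact Int.emod_lt_of_pos a (by omega)
  have hdef : a % S = a - S * (a / S) := Int.emod_def a S
  have hq0 : a / S ≤ 0 := by
    by_contra hcon
    push_neg at hcon
    have h3 : S * (a / S) ≤ S * 1 := by
      have := mul_le_mul_of_nonpos_left (show (1:Int) ≤ a / S by omega) (show S ≤ 0 by omega)
      simpa using this
    omega
  by_cases hd : 0 ≤ S ∨ S ∣ a
  · have hd' : S ∣ a := hd.resolve_left (by omega)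
    have hz : a % S = 0 := Int.emod_eq_zero_of_dvd hd'
    have hc : Int.fdiv a S = a / S := by rw [hfd, if_pos hd]; ring
    have hq1 : a / S ≤ -1 := by
      rcases (show a / S = 0 ∨ a / S ≤ -1 by omega) with h | h
      · rw [h] at hdef; omega
      · exact h
    have hg : a - a / S * S = a % S := by rw [hdef]; ring
    exact ⟨by omega, by rw [hc]; omega⟩
  · have hc : Int.fdiv a S = a / S - 1 := by rw [hfd, if_neg hd]
    have hexp : a - (a / S - 1) * S = a % S + S := by rw [hdef]; ring
    constructor
    · omega
    · rw [hc]; omega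

-- B returns p on the degenerate region p ≤ -2, a ≥ 1 (one greedy step, negative block).
lemma pv_alt_neg {p a : Int} (hp : p ≤ -2) (ha : 1 ≤ a) : compute_M_alt p a = p := by
  unfold compute_M_alt
  obtain ⟨P, S, hPS, hS, hP⟩ := pvChoose_neg hp a.toNat p 1 (le_refl 1) ha (le_refl p)
    (by omega)
  have hfuel : a.toNat = (a.toNat - 1) + 1 := by omega
  rw [hfuel]
  simp only [pvGreedy, if_pos (show (0:Int) < a by omega), hPS]
  obtain ⟨hc1, hr⟩ := pv_fdiv_neg ha hS
  have hstop : ∀ f M, pvGreedy p f M (a - Int.fdiv a S * S) = M := by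
    intro f M
    cases f with
    | zero => rfl
    | succ f => simp only [pvGreedy, if_neg (show ¬(0:Int) < a - Int.fdiv a S * S by omega)]
  rw [hstop]
  have hPpos : 0 < P := by nlinarith
  have hcP : Int.fdiv a S * P ≤ p := by
    have h3 : Int.fdiv a S * P ≤ -1 * P := mul_le_mul_of_nonneg_right hc1 (by omega)
    have h4 : -(p * p) ≤ p := by nlinarith
    omega
  rw [zero_add]
  exact max_eq_right hcP

-- A returns its lower bound p immediately whenever p·a ≤ p.
lemma pv_A_stop {p a : Int} (h : p * a ≤ p) : compute_M p a = p := by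
  unfold compute_M
  rw [pvLoopA, dif_neg (by omega)]

-- main region 2 ≤ p, factored out of the verdict.
lemma pv_spec_main (p a : Int) (hp2 : (2:Int) ≤ p) : Spec_compute_M p a (compute_M p a) := by
  unfold Spec_compute_M compute_M compute_M_alt
  rw [pvGreedy_eq hp2 a.toNat 0 a (le_refl _), zero_add]
  by_cases ha : 1 ≤ a
  · obtain ⟨hDp, hDL, hDV⟩ := pvG_main hp2 a.toNat a (le_refl _) ha
    have hple : p ≤ p * a := by
      have h := mul_le_mul_of_nonneg_left ha (show (0:Int) ≤ p by omega)
      rw [mul_one] at h; exact h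
    have hLpa : a ≤ pvL p (p * a) := by
      have h1 : p * a / p = a := Int.mul_ediv_cancel_left a (by omega)
      have h2 := pvL_nonneg hp2 a.toNat a (le_refl _) (by omega)
      rw [pvL_eq hp2 (p * a) (by omega), h1]
      omega
    obtain ⟨h1, h2, h3, h4⟩ := pvLoopA_spec hp2 (p * a - p).toNat p (p * a)
      (le_refl _) (by omega) hple hLpa
    have hmax : max (pvG p a) p = pvG p a := max_eq_left hDp
    rw [hmax]
    rcases lt_trichotomy (pvLoopA p a p (p * a)) (pvG p a) with h | h | h
    · have := pvG_min hp2 a (pvLoopA p a p (p * a)) ha (by omega) h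
      omega
    · exact h
    · have := h4 (pvG p a) hDp h
      omega
  · have hpa : p * a ≤ 0 := by
      have h := mul_le_mul_of_nonneg_left (show a ≤ 0 by omega) (show (0:Int) ≤ p by omega)
      rw [mul_zero] at h; exact h
    rw [pvLoopA, dif_neg (by omega), pvG_zero (by omega)]
    have : max (0:Int) p = p := max_eq_right (by omega)
    rw [this]

-- ===== VERDICT (by name: the statement is the Claim_ definition above) =====
theorem compute_M_spec : Claim_equal_compute_M := by
  intro p a _ hpre
  rcases hpre with hp | ⟨hp, ha⟩ | ⟨hp, ha⟩ | ⟨hp, ha⟩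
  · exact pv_spec_main p a hp
  · -- p ≤ -2, a ≥ 1: both return p
    unfold Spec_compute_M
    rw [pv_alt_neg hp ha, pv_A_stop]
    have h1 : p * (a - 1) ≤ 0 := mul_nonpos_of_nonpos_of_nonneg (by omega) (by omega)
    nlinarith
  · -- p = 0, a ≤ 0: both return 0
    subst hp
    unfold Spec_compute_M compute_M compute_M_alt
    have h0 : a.toNat = 0 := by omega
    rw [h0]
    simp only [pvGreedy]
    rw [pvLoopA, dif_neg (by omega)]
    simp
  · -- p = 1, a ≤ 1: both return 1
    subst hp
    unfold Spec_compute_M compute_M compute_M_alt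
    rcases (show a = 1 ∨ a ≤ 0 by omega) with h1 | h1
    · subst h1
      rw [pvLoopA, dif_neg (by omega)]
      decide
    · have h0 : a.toNat = 0 := by omega
      rw [h0]
      simp only [pvGreedy]
      rw [pvLoopA, dif_neg (by omega)]
      simp
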